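-- pv_equiv track=rewrite | github.com/patrickvk1978/sports-closet-tracker | api/narrative_planner.py | _select_persona
-- ===== SOURCE A (Python) =====
-- PERSONA_AFFINITY = {
--     'stat_nerd':          ['leverage', 'prize_race', 'momentum', 'standings'],
--     'color_commentator':  ['rooting', 'matchup', 'standings', 'momentum', 'elimination'],
--     'barkley':            ['elimination', 'spectator', 'rooting', 'unique_pick'],
-- }
--
-- def _select_persona(angle, feed_history, player_name, global_persona_counts):
--     """Pick a persona for this player+angle, avoiding recent repetition."""
--     hist = feed_history.get(player_name, {})
--     last_personas = hist.get('last_personas', [])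
--     last_persona = last_personas[-1] if last_personas else None
--
--     # Find personas with affinity for this angle
--     affinity = []
--     for persona, angles in PERSONA_AFFINITY.items():
--         if angle in angles:
--             affinity.append(persona)
--
--     if not affinity:
--         affinity = list(PERSONA_AFFINITY.keys())
--
--     # Score each by: affinity rank (lower=better) + avoid last persona + balance globally
--     scored = []
--     for p in affinity:
--         score = 0
--         # Penalize if same as last persona for this player
--         if p == last_persona:
--             score += 10
--         # Penalize if this persona used a lot globally this cycle
--         score += global_persona_counts.get(p, 0) * 2
--         # Bonus for affinity rank
--         score += affinity.index(p)
--         scored.append((score, p))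
--
--     scored.sort(key=lambda x: x[0])
--     return scored[0][1]
-- ===== SOURCE B (Python) =====
-- PERSONA_AFFINITY = {
--     'stat_nerd':          ['leverage', 'prize_race', 'momentum', 'standings'],
--     'color_commentator':  ['rooting', 'matchup', 'standings', 'momentum', 'elimination'],
--     'barkley':            ['elimination', 'spectator', 'rooting', 'unique_pick'],
-- }
--
-- def _select_persona(angle, feed_history, player_name, global_persona_counts):
--     """Pick a persona for this player+angle, avoiding recent repetition."""
--     last_personas = feed_history.get(player_name, {}).get('last_personas', [])
--     last_persona = last_personas[-1] if last_personas else None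
--
--     candidates = [p for p, angles in PERSONA_AFFINITY.items() if angle in angles]
--     if not candidates:
--         candidates = list(PERSONA_AFFINITY)
--
--     # single pass: keep the first candidate with the strictly smallest score
--     best = None
--     best_score = None
--     for rank, p in enumerate(candidates):
--         score = rank + 2 * global_persona_counts.get(p, 0) + (10 if p == last_persona else 0)
--         if best_score is None or score < best_score:
--             best, best_score = p, score
--     return best
-- ===== Notes on version B (the rewrite author's own statement) =====
-- stated objective: simpler
-- what changed: B drops A's scored-list construction, its affinity.index inner scan and the stable sort, selecting the winner in one first-strict-minimum pass over the enumerated candidates (enumerate supplies the rank directly).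
import Mathlib
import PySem

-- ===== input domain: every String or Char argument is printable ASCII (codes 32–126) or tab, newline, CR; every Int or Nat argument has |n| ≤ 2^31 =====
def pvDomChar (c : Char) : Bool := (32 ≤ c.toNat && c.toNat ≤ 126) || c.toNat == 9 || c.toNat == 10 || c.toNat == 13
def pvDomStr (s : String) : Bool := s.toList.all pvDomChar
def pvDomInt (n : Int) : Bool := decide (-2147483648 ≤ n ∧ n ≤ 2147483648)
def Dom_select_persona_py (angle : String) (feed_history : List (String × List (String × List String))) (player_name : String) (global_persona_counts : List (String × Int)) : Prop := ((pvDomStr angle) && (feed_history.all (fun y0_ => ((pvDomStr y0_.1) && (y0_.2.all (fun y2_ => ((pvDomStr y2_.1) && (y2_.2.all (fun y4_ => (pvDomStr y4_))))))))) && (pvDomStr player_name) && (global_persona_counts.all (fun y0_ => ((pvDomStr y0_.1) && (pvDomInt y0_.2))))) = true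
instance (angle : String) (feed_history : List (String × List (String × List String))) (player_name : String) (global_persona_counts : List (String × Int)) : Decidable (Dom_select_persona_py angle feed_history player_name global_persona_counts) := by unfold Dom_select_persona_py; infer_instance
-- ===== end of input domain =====

-- B replaces A's scored-list construction, affinity.index scan and sort by a single
-- first-strict-minimum pass over the enumerated candidates (objective: simpler).


-- ===== PORT A =====
def personaAffinity : List (String × List String) :=
  [("stat_nerd",         ["leverage", "prize_race", "momentum", "standings"]),
   ("color_commentator", ["rooting", "matchup", "standings", "momentum", "elimination"]),
   ("barkley",           ["elimination", "spectator", "rooting", "unique_pick"])]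

def select_persona_py (angle : String) (feed_history : List (String × List (String × List String))) (player_name : String) (global_persona_counts : List (String × Int)) : String :=
  let hist : List (String × List String) := PySem.Dict.getD (PySem.Dict.mk feed_history) player_name []
  let last_personas : List String := PySem.Dict.getD (PySem.Dict.mk hist) "last_personas" []
  let last_persona : Option String :=
    if last_personas.isEmpty then none else PySem.List.pyGet? last_personas (-1)
  let affinity : List String :=
    personaAffinity.foldl (fun acc pa => if pa.2.contains angle then acc ++ [pa.1] else acc) []
  let affinity : List String := if affinity.isEmpty then personaAffinity.map Prod.fst else affinity
  let scored : List (Int × String) :=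
    affinity.foldl (fun acc p =>
      let score : Int :=
        (if some p = last_persona then (0 : Int) + 10 else 0)
        + PySem.Dict.getD (PySem.Dict.mk global_persona_counts) p 0 * 2
        + (match PySem.List.index? affinity p with | some i => (i : Int) | none => 0)
        -- .index(p): p ∈ affinity always, so the `none` (ValueError) arm is unreachable
      acc ++ [(score, p)]) []
  match PySem.List.sorted scored (fun x => x.1) false with
  | (_, p) :: _ => p
  | [] => ""   -- unreachable: affinity (hence scored) is never empty

-- ===== PORT B =====
def select_persona_py_alt (angle : String) (feed_history : List (String × List (String × List String))) (player_name : String) (global_persona_counts : List (String × Int)) : String :=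
  let last_personas : List String :=
    PySem.Dict.getD (PySem.Dict.mk (PySem.Dict.getD (PySem.Dict.mk feed_history) player_name [])) "last_personas" []
  let last_persona : Option String :=
    if last_personas.isEmpty then none else PySem.List.pyGet? last_personas (-1)
  let candidates : List String :=
    (personaAffinity.filter (fun pa => pa.2.contains angle)).map Prod.fst
  let candidates : List String :=
    if candidates.isEmpty then personaAffinity.map Prod.fst else candidates
  let best : Option String × Option Int :=
    (PySem.List.enumerate candidates 0).foldl
      (fun st rp =>
        let score : Int :=
          rp.1 + 2 * PySem.Dict.getD (PySem.Dict.mk global_persona_counts) rp.2 0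
          + (if some rp.2 = last_persona then (10 : Int) else 0)
        match st.2 with
        | none => (some rp.2, some score)
        | some b => if score < b then (some rp.2, some score) else st)
      (none, none)
  best.1.getD ""   -- unreachable default: candidates is never empty

-- ===== PRECONDITION & SPEC =====
def Spec_select_persona_py (angle : String) (feed_history : List (String × List (String × List String))) (player_name : String) (global_persona_counts : List (String × Int)) (out : String) : Prop := out = select_persona_py_alt angle feed_history player_name global_persona_counts
instance (angle : String) (feed_history : List (String × List (String × List String))) (player_name : String) (global_persona_counts : List (String × Int)) (out : String) : Decidable (Spec_select_persona_py angle feed_history player_name global_persona_counts out) := by unfold Spec_select_persona_py; infer_instance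

-- ===== CLAIM (what is proved, stated in full; the proofs are below) =====
def Claim_equal_select_persona_py : Prop := ∀ (angle : String) (feed_history : List (String × List (String × List String))) (player_name : String) (global_persona_counts : List (String × Int)), Dom_select_persona_py angle feed_history player_name global_persona_counts → Spec_select_persona_py angle feed_history player_name global_persona_counts (select_persona_py angle feed_history player_name global_persona_counts)

-- ===== LEMMAS AND PROOFS =====

-- sort-then-head over one, two or three scored entries = first strict minimum
lemma pick1 (e1 : Int) (q1 : String) (d : String) :
    (match PySem.List.sorted [(e1, q1)] (fun x => x.1) false with
     | (_, p) :: _ => p | [] => d) = q1 := by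
  simp [PySem.List.sorted_eq_foldl_insertBy, PySem.List.insertBy]

lemma pick2 (e1 e2 : Int) (q1 q2 : String) (d : String) :
    (match PySem.List.sorted [(e1, q1), (e2, q2)] (fun x => x.1) false with
     | (_, p) :: _ => p | [] => d) = (if e2 < e1 then q2 else q1) := by
  simp only [PySem.List.sorted_eq_foldl_insertBy, PySem.List.insertBy, List.foldl]
  split_ifs <;> simp only [decide_eq_true_eq] at * <;> first | rfl | omega

lemma pick3 (e1 e2 e3 : Int) (q1 q2 q3 : String) (d : String) :
    (match PySem.List.sorted [(e1, q1), (e2, q2), (e3, q3)] (fun x => x.1) false with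
     | (_, p) :: _ => p | [] => d) =
    (if e2 < e1 then (if e3 < e2 then q3 else q2) else (if e3 < e1 then q3 else q1)) := by
  simp only [PySem.List.sorted_eq_foldl_insertBy, PySem.List.insertBy, List.foldl]
  split_ifs <;> simp only [PySem.List.insertBy] <;> split_ifs <;>
    simp only [decide_eq_true_eq] at * <;> first | rfl | omega

-- ===== VERDICT (by name: the statement is the Claim_ definition above) =====
set_option maxHeartbeats 2000000 in
theorem select_persona_py_spec : Claim_equal_select_persona_py := by
  intro angle feed_history player_name global_persona_counts _
  unfold Spec_select_persona_py select_persona_py select_persona_py_alt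
  simp only [PySem.List.foldl_append_if]
  generalize (if (PySem.Dict.getD (PySem.Dict.mk (PySem.Dict.getD (PySem.Dict.mk feed_history) player_name [])) "last_personas" ([] : List String)).isEmpty = true then (none : Option String) else PySem.List.pyGet? (PySem.Dict.getD (PySem.Dict.mk (PySem.Dict.getD (PySem.Dict.mk feed_history) player_name [])) "last_personas" []) (-1)) = L
  rcases h1 : (["leverage", "prize_race", "momentum", "standings"].contains angle) <;>
  rcases h2 : (["rooting", "matchup", "standings", "momentum", "elimination"].contains angle) <;>
  rcases h3 : (["elimination", "spectator", "rooting", "unique_pick"].contains angle) <;>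
    simp only [personaAffinity, List.filter_cons, List.filter_nil, h1, h2, h3,
      List.map_cons, List.map_nil, List.isEmpty_cons, List.isEmpty_nil, Bool.false_eq_true,
      if_false, if_true, List.foldl, PySem.List.enumerate, PySem.List.index?,
      List.idxOf?, List.nil_append, List.cons_append, List.append_nil] <;>
    simp only [List.findIdx?, List.findIdx?.go, String.reduceBEq] <;>
    (try norm_num) <;>
    (try generalize PySem.Dict.getD (PySem.Dict.mk global_persona_counts) "stat_nerd" (0:Int) = c1) <;>
    (try generalize PySem.Dict.getD (PySem.Dict.mk global_persona_counts) "color_commentator" (0:Int) = c2) <;>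
    (try generalize PySem.Dict.getD (PySem.Dict.mk global_persona_counts) "barkley" (0:Int) = c3) <;>
    (first | rw [pick3] | rw [pick2] | rw [pick1]) <;>
    split_ifs <;> (try simp at *) <;> (try split_ifs) <;> first | rfl | omega
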